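-- pv_equiv track=rewrite | github.com/HIllya51/LunaTranslator | src/LunaTranslator/myutils/utils.py | checkv1
-- ===== SOURCE A (Python) =====
-- def checkv1(api_url: str):
--     # 傻逼豆包大模型是非要v3，不是v1
--     # 智谱AI v4
--     for i in range(1, 10):
--         if api_url.endswith("/v{}".format(i)):
--             return api_url
--         elif api_url.endswith("/v{}/".format(i)):
--             return api_url[:-1]
--     if api_url.endswith("/"):
--         return api_url + "v1"
--     else:
--         return api_url + "/v1"
-- ===== SOURCE B (Python) =====
-- def checkv1(api_url: str):
--     u = api_url[:-1] if api_url.endswith("/") else api_url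
--     if len(u) >= 3 and u[-3] == "/" and u[-2] == "v" and u[-1] in "123456789":
--         return u
--     return api_url + ("v1" if api_url.endswith("/") else "/v1")
-- ===== Notes on version B (the rewrite author's own statement) =====
-- stated objective: simpler
-- what changed: A scans nine suffix templates (slash-v-digit for digits 1..9, each with and without a trailing slash) in a loop of endswith checks; B strips an optional trailing slash once and directly inspects the last three characters (slash, letter v, nonzero digit), appending the version suffix if the pattern is absent.
import Mathlib
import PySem

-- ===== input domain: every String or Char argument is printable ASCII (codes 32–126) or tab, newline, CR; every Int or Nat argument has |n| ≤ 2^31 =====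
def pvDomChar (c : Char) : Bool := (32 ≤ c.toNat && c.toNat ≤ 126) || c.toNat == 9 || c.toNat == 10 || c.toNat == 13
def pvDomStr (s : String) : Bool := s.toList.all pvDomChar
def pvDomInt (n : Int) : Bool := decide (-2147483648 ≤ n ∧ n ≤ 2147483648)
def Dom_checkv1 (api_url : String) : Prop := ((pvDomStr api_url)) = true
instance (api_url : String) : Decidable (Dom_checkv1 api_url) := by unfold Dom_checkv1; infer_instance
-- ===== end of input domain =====

-- B replaces A's nine-template endswith loop by one trailing-slash strip plus a direct
-- inspection of the last three characters (simpler; same exact behaviour, no speed claim).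

-- ===== PORT A =====
-- the 'for i in range(1, 10)' loop with its two early returns; none = fell through
def checkv1LoopA (l : List Char) : List Int → Option (List Char)
  | [] => none
  | i :: rest =>
    if PySem.Chars.endswith l (['/', 'v'] ++ PySem.Int.toChars i) then some l
    else if PySem.Chars.endswith l (['/', 'v'] ++ PySem.Int.toChars i ++ ['/']) then
      some (PySem.List.slice l none (some (-1)))
    else checkv1LoopA l rest

def checkv1 (api_url : String) : String :=
  let l := api_url.toList
  match checkv1LoopA l (PySem.List.pyRange 1 10 1) with
  | some r => String.ofList r
  | none =>
    if PySem.Chars.endswith l ['/'] then String.ofList (l ++ ['v', '1'])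
    else String.ofList (l ++ ['/', 'v', '1'])

-- ===== PORT B =====
-- Source B: u = api_url[:-1] if trailing slash else api_url; return u if it ends in "/v<digit>",
-- else append "v1"/"/v1" to api_url
def checkv1_alt (api_url : String) : String :=
  let l := api_url.toList
  let u := if PySem.Chars.endswith l ['/'] then PySem.List.slice l none (some (-1)) else l
  if 3 ≤ u.length && (PySem.List.pyGet? u (-3) == some '/') &&
      (PySem.List.pyGet? u (-2) == some 'v') &&
      ((PySem.List.pyGet? u (-1)).any fun c => PySem.Chars.isIn [c] ['1','2','3','4','5','6','7','8','9']) then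
    String.ofList u
  else if PySem.Chars.endswith l ['/'] then String.ofList (l ++ ['v', '1'])
  else String.ofList (l ++ ['/', 'v', '1'])

-- ===== PRECONDITION & SPEC =====
def Spec_checkv1 (api_url : String) (out : String) : Prop := out = checkv1_alt api_url
instance (api_url : String) (out : String) : Decidable (Spec_checkv1 api_url out) := by unfold Spec_checkv1; infer_instance

-- ===== CLAIM (what is proved, stated in full; the proofs are below) =====
def Claim_equal_checkv1 : Prop := ∀ (api_url : String), Dom_checkv1 api_url → Spec_checkv1 api_url (checkv1 api_url)

-- ===== LEMMAS AND PROOFS =====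

theorem pyGet?_rev {α : Type} (s : List α) (k : Nat) :
    PySem.List.pyGet? s.reverse (-((k : Int)+1)) = s[k]? := by
  simp only [PySem.List.pyGet?, PySem.List.pyIdx?, List.length_reverse]
  split_ifs with h1 h2 h3 <;> try omega
  · have hk : k < s.length := by omega
    have h : s.length - (-(-((k:Int)+1))).toNat = s.length - 1 - k := by omega
    rw [h]
    show s.reverse[s.length-1-k]? = s[k]?
    rw [List.getElem?_reverse (by omega)]
    congr 1; omega
  · rw [List.getElem?_eq_none (by omega)]; rfl

theorem endswith_rev (r p : List Char) :
    PySem.Chars.endswith r.reverse p = p.reverse.isPrefixOf r := by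
  simp [PySem.Chars.endswith, List.isSuffixOf]

theorem isIn_digits (c : Char) :
    PySem.Chars.isIn [c] ['1','2','3','4','5','6','7','8','9'] =
      (c=='1'||c=='2'||c=='3'||c=='4'||c=='5'||c=='6'||c=='7'||c=='8'||c=='9') := by
  have h : PySem.Chars.isIn [c] ['1','2','3','4','5','6','7','8','9'] = true ↔
      c ∈ (['1','2','3','4','5','6','7','8','9'] : List Char) := by
    rw [PySem.Chars.isIn_iff_infix, List.singleton_infix_iff]
  rw [Bool.eq_iff_iff, h]
  simp only [List.mem_cons, Bool.or_eq_true, beq_iff_eq, List.not_mem_nil, or_false]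
  tauto

theorem isPrefixOf1 {x : Char} {r : List Char} :
    List.isPrefixOf [x] r = (r[0]? == some x) := by
  cases r with
  | nil => rfl
  | cons a s => simp [List.isPrefixOf, BEq.comm]

theorem isPrefixOf3 {x y z : Char} {r : List Char} :
    List.isPrefixOf [x, y, z] r = ((r[0]? == some x) && (r[1]? == some y) && (r[2]? == some z)) := by
  match r with
  | [] => rfl
  | [a] => simp [List.isPrefixOf]
  | [a,b] => simp [List.isPrefixOf]
  | a::b::c::s => simp [List.isPrefixOf, BEq.comm, Bool.and_assoc]

theorem isPrefixOf4 {x y z w : Char} {r : List Char} :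
    List.isPrefixOf [x, y, z, w] r = ((r[0]? == some x) && (r[1]? == some y) && (r[2]? == some z) && (r[3]? == some w)) := by
  match r with
  | [] => rfl
  | [a] => simp [List.isPrefixOf]
  | [a,b] => simp [List.isPrefixOf]
  | [a,b,c] => simp [List.isPrefixOf]
  | a::b::c::d::s => simp [List.isPrefixOf, BEq.comm, Bool.and_assoc]
theorem pyGet?_rev1 {α : Type} (s : List α) : PySem.List.pyGet? s.reverse (-1) = s[0]? := by
  have h := pyGet?_rev s 0; norm_num at h; exact h
theorem pyGet?_rev2 {α : Type} (s : List α) : PySem.List.pyGet? s.reverse (-2) = s[1]? := by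
  have h := pyGet?_rev s 1; norm_num at h; exact h
theorem pyGet?_rev3 {α : Type} (s : List α) : PySem.List.pyGet? s.reverse (-3) = s[2]? := by
  have h := pyGet?_rev s 2; norm_num at h; exact h

def dig (x : Char) : Bool :=
  x=='1'||x=='2'||x=='3'||x=='4'||x=='5'||x=='6'||x=='7'||x=='8'||x=='9'

def model (r : List Char) : List Char :=
  if (r[2]? == some '/') && (r[1]? == some 'v') && (r[0]?.any dig) then r.reverse
  else if (r[0]? == some '/') && (r[3]? == some '/') && (r[2]? == some 'v') && (r[1]?.any dig) then r.tail.reverse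
  else if r[0]? == some '/' then r.reverse ++ ['v','1']
  else r.reverse ++ ['/','v','1']

theorem keyB (r : List Char) :
    checkv1_alt (String.ofList r.reverse) = String.ofList (model r) := by
  unfold checkv1_alt model
  simp only [String.toList_ofList, endswith_rev, List.reverse_singleton, isPrefixOf1]
  by_cases h0 : r[0]? = some '/'
  · rcases r with _ | ⟨a, s⟩
    · simp at h0
    · rw [List.getElem?_cons_zero] at h0
      injection h0 with h0; subst h0
      simp only [List.reverse_cons, PySem.List.slice_to_neg_one, List.dropLast_concat,
        List.getElem?_cons_zero, List.getElem?_cons_succ, beq_self_eq_true, if_pos,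
        List.length_reverse, pyGet?_rev1, pyGet?_rev2, pyGet?_rev3, List.tail_cons]
      by_cases h2 : s[2]? = some '/'
      · have hlen : 2 < s.length := by
          rcases List.getElem?_eq_some_iff.mp h2 with ⟨h, _⟩; exact h
        have hdig : (fun c => PySem.Chars.isIn [c] ['1','2','3','4','5','6','7','8','9']) = dig :=
          funext fun c => isIn_digits c
        have h3 : decide (3 ≤ s.length) = true := by simp; omega
        simp [hdig, h2, h3, dig]
        split_ifs <;> simp [String.ofList_append]
      · have hdig : (fun c => PySem.Chars.isIn [c] ['1','2','3','4','5','6','7','8','9']) = dig :=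
          funext fun c => isIn_digits c
        simp [hdig, h2, dig]
  · have hdig : (fun c => PySem.Chars.isIn [c] ['1','2','3','4','5','6','7','8','9']) = dig :=
      funext fun c => isIn_digits c
    have h0' : (r[0]? == some '/') = false := by simp [h0]
    simp only [h0', Bool.false_eq_true, Bool.false_and, hdig]
    by_cases h2 : r[2]? = some '/'
    · have hlen : 2 < r.length := by
        rcases List.getElem?_eq_some_iff.mp h2 with ⟨h, _⟩; exact h
      have h3 : decide (3 ≤ r.length) = true := by simp; omega
      simp [h2, h3, pyGet?_rev1, pyGet?_rev2, pyGet?_rev3]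
      split_ifs <;> simp [String.ofList_append]
    · simp [h2, pyGet?_rev1, pyGet?_rev2, pyGet?_rev3]
theorem any_dig_beq_false {o : Option Char} {d : Char} (h : o.any dig = false) (hd : dig d = true) :
    (o == some d) = false := by
  cases o with
  | none => rfl
  | some x =>
    simp only [Option.any_some] at h
    simp [show x ≠ d from fun hx => by subst hx; rw [h] at hd; cases hd]

theorem loopA_char (r : List Char) :
    checkv1LoopA r.reverse (PySem.List.pyRange 1 10 1) =
      (if (r[2]? == some '/') && (r[1]? == some 'v') && (r[0]?.any dig) then some r.reverse
      else if (r[0]? == some '/') && (r[3]? == some '/') && (r[2]? == some 'v') && (r[1]?.any dig) then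
        some (PySem.List.slice r.reverse none (some (-1)))
      else none) := by
  have hR : PySem.List.pyRange 1 10 1 = [1,2,3,4,5,6,7,8,9] := by decide
  have t1 : PySem.Int.toChars 1 = ['1'] := by decide
  have t2 : PySem.Int.toChars 2 = ['2'] := by decide
  have t3 : PySem.Int.toChars 3 = ['3'] := by decide
  have t4 : PySem.Int.toChars 4 = ['4'] := by decide
  have t5 : PySem.Int.toChars 5 = ['5'] := by decide
  have t6 : PySem.Int.toChars 6 = ['6'] := by decide
  have t7 : PySem.Int.toChars 7 = ['7'] := by decide
  have t8 : PySem.Int.toChars 8 = ['8'] := by decide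
  have t9 : PySem.Int.toChars 9 = ['9'] := by decide
  simp only [hR, checkv1LoopA, t1, t2, t3, t4, t5, t6, t7, t8, t9, endswith_rev,
    List.cons_append, List.nil_append, List.reverse_cons, List.reverse_nil,
    isPrefixOf3, isPrefixOf4]
  by_cases hv : r[1]? = some 'v'
  · by_cases hs : r[2]? = some '/'
    · by_cases hd : r[0]?.any dig = true
      · cases o : r[0]? with
        | none => rw [o] at hd; simp at hd
        | some x =>
          rw [o] at hd; simp only [Option.any_some] at hd
          simp only [dig, Bool.or_eq_true, beq_iff_eq] at hd
          rcases hd with ((((((((h|h)|h)|h)|h)|h)|h)|h)|h) <;> subst h <;> simp [hv, hs, dig]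
      · rw [Bool.not_eq_true] at hd
        have f1 : (r[0]? == some '1') = false := any_dig_beq_false hd (by decide)
        have f2 : (r[0]? == some '2') = false := any_dig_beq_false hd (by decide)
        have f3 : (r[0]? == some '3') = false := any_dig_beq_false hd (by decide)
        have f4 : (r[0]? == some '4') = false := any_dig_beq_false hd (by decide)
        have f5 : (r[0]? == some '5') = false := any_dig_beq_false hd (by decide)
        have f6 : (r[0]? == some '6') = false := any_dig_beq_false hd (by decide)
        have f7 : (r[0]? == some '7') = false := any_dig_beq_false hd (by decide)
        have f8 : (r[0]? == some '8') = false := any_dig_beq_false hd (by decide)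
        have f9 : (r[0]? == some '9') = false := any_dig_beq_false hd (by decide)
        simp [hv, hs, hd, f1, f2, f3, f4, f5, f6, f7, f8, f9, dig]
    · simp [hv, hs, dig]
  · by_cases hd1 : r[1]?.any dig = true
    · cases o : r[1]? with
      | none => rw [o] at hd1; simp at hd1
      | some x =>
        rw [o] at hd1; simp only [Option.any_some] at hd1
        simp only [dig, Bool.or_eq_true, beq_iff_eq] at hd1
        rcases hd1 with ((((((((h|h)|h)|h)|h)|h)|h)|h)|h) <;> subst h <;>
          by_cases h0 : r[0]? = some '/' <;> by_cases h2v : r[2]? = some 'v' <;>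
          by_cases h3 : r[3]? = some '/' <;> simp [h0, h2v, h3, dig]
    · rw [Bool.not_eq_true] at hd1
      have f1 : (r[1]? == some '1') = false := any_dig_beq_false hd1 (by decide)
      have f2 : (r[1]? == some '2') = false := any_dig_beq_false hd1 (by decide)
      have f3 : (r[1]? == some '3') = false := any_dig_beq_false hd1 (by decide)
      have f4 : (r[1]? == some '4') = false := any_dig_beq_false hd1 (by decide)
      have f5 : (r[1]? == some '5') = false := any_dig_beq_false hd1 (by decide)
      have f6 : (r[1]? == some '6') = false := any_dig_beq_false hd1 (by decide)
      have f7 : (r[1]? == some '7') = false := any_dig_beq_false hd1 (by decide)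
      have f8 : (r[1]? == some '8') = false := any_dig_beq_false hd1 (by decide)
      have f9 : (r[1]? == some '9') = false := any_dig_beq_false hd1 (by decide)
      simp [hv, hd1, f1, f2, f3, f4, f5, f6, f7, f8, f9]
theorem slice_rev (r : List Char) :
    PySem.List.slice r.reverse none (some (-1)) = r.tail.reverse := by
  cases r with
  | nil => rfl
  | cons a s => simp [PySem.List.slice_to_neg_one, List.reverse_cons]

theorem key' (r : List Char) :
    (match checkv1LoopA r.reverse (PySem.List.pyRange 1 10 1) with
      | some s => String.ofList s
      | none =>
        if PySem.Chars.endswith r.reverse ['/'] then String.ofList (r.reverse ++ ['v', '1'])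
        else String.ofList (r.reverse ++ ['/', 'v', '1'])) =
    checkv1_alt (String.ofList r.reverse) := by
  rw [keyB, loopA_char, slice_rev]
  unfold model
  simp only [endswith_rev, List.reverse_singleton, isPrefixOf1]
  split_ifs <;> simp

-- ===== VERDICT (by name: the statement is the Claim_ definition above) =====
theorem checkv1_spec : Claim_equal_checkv1 := by
  intro api_url _
  unfold Spec_checkv1
  have h : api_url = String.ofList api_url.toList.reverse.reverse := by
    rw [List.reverse_reverse, String.ofList_toList]
  rw [h]
  unfold checkv1
  simp only [String.toList_ofList]
  exact key' api_url.toList.reverse
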